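-- pv_equiv track=rewrite | github.com/Va-rx/Algorithms-and-Data-Structures | Graph-Algorithms/Silne Spojne Skladowe/main.py | DFSR
-- ===== SOURCE A (Python) =====
-- def DFSR(G, Przetworzenie):
--     n = len(G)
--     Visited = [False for _ in range(n)]
--     wynik = []
--
--     def DFSVISIT(G, v):
--         Visited[v] = True
--         for u in G[v]:
--             if not Visited[u]:
--                 DFSVISIT(G, u)
--         wynik[-1].append(v)
--
--     for i in range(n):
--         v = Przetworzenie[i][1]
--         if not Visited[v]:
--             wynik.append([])
--             DFSVISIT(G, v)
--
--     return wynik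
-- ===== SOURCE B (Python) =====
-- def DFSR(G, Przetworzenie):
--     n = len(G)
--     visited = [False] * n
--     wynik = []
--     for i in range(n):
--         v = Przetworzenie[i][1]
--         if not visited[v]:
--             comp = []
--             visited[v] = True
--             stack = [(v, 0)]
--             while stack:
--                 w, idx = stack[-1]
--                 nbrs = G[w]
--                 if idx < len(nbrs):
--                     stack[-1] = (w, idx + 1)
--                     u = nbrs[idx]
--                     if not visited[u]:
--                         visited[u] = True
--                         stack.append((u, 0))
--                 else:
--                     stack.pop()
--                     comp.append(w)
--             wynik.append(comp)
--     return wynik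
-- ===== Notes on version B (the rewrite author's own statement) =====
-- stated objective: alternative
-- what changed: A's recursive DFSVISIT closure that mutates Visited/wynik is replaced by an explicit-stack iterative DFS with (vertex, neighbor-index) frames, marking on push and appending on pop to reproduce the same post-order per component.
-- outside the precondition, e.g. on DFSR([[], [5]], [(0, 0), (0, 0)]): A returns [[0]], B returns [[0]]
import Mathlib
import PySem

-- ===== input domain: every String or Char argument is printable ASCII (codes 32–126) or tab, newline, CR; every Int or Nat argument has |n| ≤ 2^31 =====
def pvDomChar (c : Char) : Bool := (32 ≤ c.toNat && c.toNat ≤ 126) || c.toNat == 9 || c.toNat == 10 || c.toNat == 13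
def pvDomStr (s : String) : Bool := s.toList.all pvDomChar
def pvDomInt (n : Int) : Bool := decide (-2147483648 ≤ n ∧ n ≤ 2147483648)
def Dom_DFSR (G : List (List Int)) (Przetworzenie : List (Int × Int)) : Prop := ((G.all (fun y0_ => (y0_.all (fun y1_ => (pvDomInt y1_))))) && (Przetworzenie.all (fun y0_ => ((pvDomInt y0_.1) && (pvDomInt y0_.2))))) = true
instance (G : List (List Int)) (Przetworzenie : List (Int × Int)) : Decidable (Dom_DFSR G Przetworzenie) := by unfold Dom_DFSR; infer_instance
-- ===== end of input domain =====

-- B replaces A's recursive closure-mutating DFSVISIT by an explicit-stack iterative DFS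
-- with (vertex, neighbor-index) frames that emits the same post-order (objective: alternative).

-- Python index normalisation for a list of length n (negative indices count from the end).
def pyIdxN (n : Nat) (i : Int) : Nat := (if i < 0 then i + n else i).toNat

-- number of `false` entries of the visited array (termination measure for both ports)
def countF (vis : List Bool) : Nat := vis.count false

-- lemma cited by loopB's decreasing_by: marking an unvisited vertex shrinks the measure
theorem countF_set_lt (vis : List Bool) (j : Nat) (h : vis.getD j true = false) :
    countF (vis.set j true) < countF vis := by
  induction vis generalizing j with
  | nil => simp [List.getD] at h
  | cons b t ih =>
    cases j with
    | zero =>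
      simp [List.getD] at h
      subst h
      simp [countF]
    | succ j =>
      have := ih j (by simpa [List.getD] using h)
      cases b <;> simpa [countF, List.count_cons] using this

-- ===== PORT A =====
-- the `for u in G[v]` loop of DFSVISIT, with `step` = the recursive call at the next fuel level
def runListA (G : List (List Int)) (step : List Bool → Int → List Int → List Bool × List Int) :
    List Bool → List Int → List Int → List Bool × List Int
  | vis, [], comp => (vis, comp)
  | vis, u :: rest, comp =>
    if vis.getD (pyIdxN G.length u) true = false then
      let p := step vis u comp
      runListA G step p.1 rest p.2
    else runListA G step vis rest comp

-- DFSVISIT; the fuel only makes the recursion structural, it is never exhausted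
-- (each nested call marks a previously unvisited vertex, so the depth is at most G.length)
def dfsA (G : List (List Int)) : Nat → List Bool → Int → List Int → List Bool × List Int
  | 0, vis, _, comp => (vis, comp)
  | f + 1, vis, v, comp =>
    let j := pyIdxN G.length v
    let p := runListA G (dfsA G f) (vis.set j true) (G.getD j []) comp
    (p.1, p.2 ++ [v])

def DFSR (G : List (List Int)) (Przetworzenie : List (Int × Int)) : List (List Int) :=
  let n := G.length
  (((List.range n).foldl (fun st i =>
      let v := (Przetworzenie.getD i (0, 0)).2
      if st.1.getD (pyIdxN n v) true = false then
        let p := dfsA G (n + 1) st.1 v []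
        (p.1, st.2 ++ [p.2])
      else st)
    (List.replicate n false, ([] : List (List Int))))).2

-- ===== PORT B =====
-- the `while stack:` loop; stack head = Python's stack[-1]; a vertex is marked when pushed
def loopB (G : List (List Int)) (vis : List Bool) (stack : List (Int × Nat)) (comp : List Int) :
    List Bool × List Int :=
  match stack with
  | [] => (vis, comp)
  | (w, idx) :: rest =>
    let nbrs := G.getD (pyIdxN G.length w) []
    if h : idx < nbrs.length then
      let u := nbrs[idx]
      if hu : vis.getD (pyIdxN G.length u) true = false then
        loopB G (vis.set (pyIdxN G.length u) true) ((u, 0) :: (w, idx + 1) :: rest) comp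
      else loopB G vis ((w, idx + 1) :: rest) comp
    else loopB G vis rest (comp ++ [w])
termination_by (countF vis, (stack.map (fun f => (G.getD (pyIdxN G.length f.1) []).length + 1 - f.2)).sum + stack.length)
decreasing_by
  · exact Prod.Lex.left _ _ (countF_set_lt vis (pyIdxN G.length u) hu)
  · apply Prod.Lex.right
    simp only [List.map_cons, List.sum_cons, List.length_cons, nbrs] at h ⊢
    omega
  · apply Prod.Lex.right
    simp only [List.map_cons, List.sum_cons, List.length_cons, nbrs] at h ⊢
    omega

def DFSR_alt (G : List (List Int)) (Przetworzenie : List (Int × Int)) : List (List Int) :=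
  let n := G.length
  (((List.range n).foldl (fun st i =>
      let v := (Przetworzenie.getD i (0, 0)).2
      let j := pyIdxN n v
      if st.1.getD j true = false then
        let p := loopB G (st.1.set j true) [(v, 0)] []
        (p.1, st.2 ++ [p.2])
      else st)
    (List.replicate n false, ([] : List (List Int))))).2

-- ===== PRECONDITION & SPEC =====
-- Pre_ = the well-formed inputs: Przetworzenie covers all n loop indices, its first n second
-- components are valid vertex indices, and every adjacency entry is a valid vertex index;
-- outside this the Python raises IndexError on every entry it actually reads.  This also
-- excludes inputs whose only invalid adjacency entries sit in rows of vertices the traversal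
-- never reaches, on which A still returns; both programs return the same value there.
def Pre_DFSR (G : List (List Int)) (Przetworzenie : List (Int × Int)) : Prop :=
  G.length ≤ Przetworzenie.length ∧
  (∀ i < G.length, -(G.length : Int) ≤ (Przetworzenie.getD i (0, 0)).2 ∧
      (Przetworzenie.getD i (0, 0)).2 < (G.length : Int)) ∧
  (∀ row ∈ G, ∀ u ∈ row, -(G.length : Int) ≤ u ∧ u < (G.length : Int))
instance (G : List (List Int)) (Przetworzenie : List (Int × Int)) : Decidable (Pre_DFSR G Przetworzenie) := by unfold Pre_DFSR; infer_instance

def pvWitness_DFSR : List (List Int) × (List (Int × Int)) := ([[1], [0]], [(0, 0), (0, 1)])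

def Spec_DFSR (G : List (List Int)) (Przetworzenie : List (Int × Int)) (out : List (List Int)) : Prop := out = DFSR_alt G Przetworzenie
instance (G : List (List Int)) (Przetworzenie : List (Int × Int)) (out : List (List Int)) : Decidable (Spec_DFSR G Przetworzenie out) := by unfold Spec_DFSR; infer_instance

-- ===== CLAIM (what is proved, stated in full; the proofs are below) =====
def Claim_equal_DFSR : Prop := ∀ (G : List (List Int)) (Przetworzenie : List (Int × Int)), Dom_DFSR G Przetworzenie → Pre_DFSR G Przetworzenie → Spec_DFSR G Przetworzenie (DFSR G Przetworzenie)

-- ===== LEMMAS AND PROOFS =====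

theorem countF_set_le (vis : List Bool) (j : Nat) : countF (vis.set j true) ≤ countF vis := by
  induction vis generalizing j with
  | nil => simp [countF]
  | cons b t ih =>
    cases j with
    | zero => cases b <;> simp [countF]
    | succ j =>
      have := ih j
      cases b <;> simpa [countF, List.count_cons] using this

theorem getD_false_lt {vis : List Bool} {j : Nat} (h : vis.getD j true = false) :
    1 ≤ countF vis := by
  have hj : j < vis.length := by
    by_contra hge
    rw [List.getD_eq_default _ _ (by omega)] at h
    exact Bool.true_eq_false.mp h
  have : false ∈ vis := by
    have := List.getD_eq_getElem vis true hj
    rw [this] at h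
    exact h ▸ List.getElem_mem hj
  simpa [countF, List.count_pos_iff] using this

theorem countF_runListA_le (G : List (List Int))
    (step : List Bool → Int → List Int → List Bool × List Int)
    (hstep : ∀ vis v comp, countF (step vis v comp).1 ≤ countF vis) :
    ∀ us vis comp, countF (runListA G step vis us comp).1 ≤ countF vis := by
  intro us
  induction us with
  | nil => intro vis comp; simp [runListA]
  | cons u rest ih =>
    intro vis comp
    simp only [runListA]
    split
    · exact le_trans (ih _ _) (hstep _ _ _)
    · exact ih _ _

theorem countF_dfsA_le (G : List (List Int)) :
    ∀ fuel vis v comp, countF (dfsA G fuel vis v comp).1 ≤ countF vis := by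
  intro fuel
  induction fuel with
  | zero => intro vis v comp; simp [dfsA]
  | succ f ih =>
    intro vis v comp
    simp only [dfsA]
    exact le_trans (countF_runListA_le G _ ih _ _ _) (countF_set_le _ _)

theorem length_runListA (G : List (List Int))
    (step : List Bool → Int → List Int → List Bool × List Int)
    (hstep : ∀ vis v comp, (step vis v comp).1.length = vis.length) :
    ∀ us vis comp, (runListA G step vis us comp).1.length = vis.length := by
  intro us
  induction us with
  | nil => intro vis comp; simp [runListA]
  | cons u rest ih =>
    intro vis comp
    simp only [runListA]
    split
    · rw [ih _ _, hstep _ _ _]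
    · exact ih _ _

theorem length_dfsA (G : List (List Int)) :
    ∀ fuel vis v comp, (dfsA G fuel vis v comp).1.length = vis.length := by
  intro fuel
  induction fuel with
  | zero => intro vis v comp; simp [dfsA]
  | succ f ih =>
    intro vis v comp
    simp only [dfsA]
    rw [length_runListA G _ ih _ _ _, List.length_set]

-- Main simulation lemma: running the stack machine on a frame (v, k) over the tail of v's
-- neighbour list equals running A's neighbour loop and then popping v (post-order emission).
theorem loopB_nil (G : List (List Int)) (vis : List Bool) (comp : List Int) :
    loopB G vis [] comp = (vis, comp) := by rw [loopB]

theorem loopB_runListA (G : List (List Int)) :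
    ∀ fuel us vis v k rest comp,
      countF vis ≤ fuel →
      us = (G.getD (pyIdxN G.length v) []).drop k →
      loopB G vis ((v, k) :: rest) comp =
        loopB G (runListA G (dfsA G fuel) vis us comp).1 rest
          ((runListA G (dfsA G fuel) vis us comp).2 ++ [v]) := by
  intro fuel
  induction fuel with
  | zero =>
    intro us
    induction us with
    | nil =>
      intro vis v k rest comp hf hus
      have hk : (G.getD (pyIdxN G.length v) []).length ≤ k := List.drop_eq_nil_iff.mp hus.symm
      rw [loopB]
      rw [dif_neg (by omega)]
      simp [runListA]
    | cons u us' ihl =>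
      intro vis v k rest comp hf hus
      have hk : k < (G.getD (pyIdxN G.length v) []).length := by
        by_contra hge
        rw [List.drop_eq_nil_of_le (by omega)] at hus
        exact List.cons_ne_nil _ _ hus
      have hcons := (List.drop_eq_getElem_cons hk).symm.trans hus.symm
      obtain ⟨h1, h2⟩ := List.cons_eq_cons.mp hcons
      rw [loopB]
      rw [dif_pos hk]
      simp only [h1]
      by_cases hvis : vis.getD (pyIdxN G.length u) true = false
      · exfalso
        have := getD_false_lt hvis
        omega
      · rw [dif_neg hvis]
        rw [ihl vis v (k + 1) rest comp hf h2.symm]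
        simp only [runListA, if_neg hvis]
  | succ f ihf =>
    intro us
    induction us with
    | nil =>
      intro vis v k rest comp hf hus
      have hk : (G.getD (pyIdxN G.length v) []).length ≤ k := List.drop_eq_nil_iff.mp hus.symm
      rw [loopB]
      rw [dif_neg (by omega)]
      simp [runListA]
    | cons u us' ihl =>
      intro vis v k rest comp hf hus
      have hk : k < (G.getD (pyIdxN G.length v) []).length := by
        by_contra hge
        rw [List.drop_eq_nil_of_le (by omega)] at hus
        exact List.cons_ne_nil _ _ hus
      have hcons := (List.drop_eq_getElem_cons hk).symm.trans hus.symm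
      obtain ⟨h1, h2⟩ := List.cons_eq_cons.mp hcons
      rw [loopB]
      rw [dif_pos hk]
      simp only [h1]
      by_cases hvis : vis.getD (pyIdxN G.length u) true = false
      · rw [dif_pos hvis]
        have hcset : countF (vis.set (pyIdxN G.length u) true) ≤ f := by
          have := countF_set_lt vis (pyIdxN G.length u) hvis
          omega
        rw [ihf (G.getD (pyIdxN G.length u) []) (vis.set (pyIdxN G.length u) true) u 0
          ((v, k + 1) :: rest) comp hcset (by simp)]
        rw [ihl _ v (k + 1) rest _
          (le_trans (le_trans (countF_runListA_le G _ (countF_dfsA_le G f) _ _ _)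
            (countF_set_le _ _)) (by omega)) h2.symm]
        simp only [runListA, dfsA, if_pos hvis]
      · rw [dif_neg hvis]
        rw [ihl vis v (k + 1) rest comp hf h2.symm]
        simp only [runListA, if_neg hvis]

theorem dfsA_loopB (G : List (List Int)) (vis : List Bool) (v : Int) (comp : List Int)
    (hlen : vis.length = G.length) (hv : vis.getD (pyIdxN G.length v) true = false) :
    dfsA G (G.length + 1) vis v comp =
      loopB G (vis.set (pyIdxN G.length v) true) [(v, 0)] comp := by
  have hcf : countF (vis.set (pyIdxN G.length v) true) ≤ G.length := by
    have h1 := countF_set_lt vis (pyIdxN G.length v) hv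
    have h2 : countF vis ≤ vis.length := List.count_le_length
    omega
  rw [loopB_runListA G G.length (G.getD (pyIdxN G.length v) []) _ v 0 [] comp hcf (by simp)]
  rw [loopB_nil]
  simp only [dfsA]

theorem fold_eq (G : List (List Int)) (P : List (Int × Int)) :
    ∀ (L : List Nat) (st : List Bool × List (List Int)), st.1.length = G.length →
      L.foldl (fun st i =>
        let v := (P.getD i (0, 0)).2
        if st.1.getD (pyIdxN G.length v) true = false then
          let p := dfsA G (G.length + 1) st.1 v []
          (p.1, st.2 ++ [p.2])
        else st) st =
      L.foldl (fun st i =>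
        let v := (P.getD i (0, 0)).2
        let j := pyIdxN G.length v
        if st.1.getD j true = false then
          let p := loopB G (st.1.set j true) [(v, 0)] []
          (p.1, st.2 ++ [p.2])
        else st) st := by
  intro L
  induction L with
  | nil => intro st h; rfl
  | cons i L ih =>
    intro st h
    simp only [List.foldl_cons]
    by_cases hg : st.1.getD (pyIdxN G.length (P.getD i (0, 0)).2) true = false
    · have hlen2 : (dfsA G (G.length + 1) st.1 (P.getD i (0, 0)).2 []).1.length = G.length := by
        rw [length_dfsA]; exact h
      rw [if_pos hg, if_pos hg]
      rw [← dfsA_loopB G st.1 (P.getD i (0, 0)).2 [] h hg]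
      exact ih _ hlen2
    · rw [if_neg hg, if_neg hg]
      exact ih st h

theorem DFSR_eq (G : List (List Int)) (Przetworzenie : List (Int × Int)) :
    DFSR G Przetworzenie = DFSR_alt G Przetworzenie := by
  unfold DFSR DFSR_alt
  exact congrArg Prod.snd (fold_eq G Przetworzenie (List.range G.length)
    (List.replicate G.length false, []) (by simp))

-- ===== VERDICT (by name: the statement is the Claim_ definition above) =====
theorem DFSR_spec : Claim_equal_DFSR := by
  intro G P _ _
  unfold Spec_DFSR
  exact DFSR_eq G P
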